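-- pv_equiv track=rewrite | github.com/tkem/uritools | uritools/normpath.py | urinormpath
-- ===== SOURCE A (Python) =====
-- def urinormpath(path):
--     """Remove '.' and '..' path segments from a URI path."""
--
--     # RFC 3986 5.2.4. Remove Dot Segments
--     out = []
--     for s in path.split('/'):
--         if s == '.':
--             continue
--         elif s != '..':
--             out.append(s)
--         elif out:
--             out.pop()
--     # Fix leading/trailing slashes
--     if path.startswith('/') and (not out or out[0]):
--         out.insert(0, '')
--     if path.endswith('/.') or path.endswith('/..'):
--         out.append('')
--     return '/'.join(out)
-- ===== SOURCE B (Python) =====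
-- def urinormpath(path):
--     """Remove '.' and '..' path segments from a URI path."""
--     # Recursive right-to-left resolution with a pending-'..' counter instead of
--     # A's imperative left-to-right stack; final string assembled in one join of
--     # head + kept + tail pieces.
--     segs = path.split('/')
--
--     def norm(i):
--         # kept segments of segs[i:] and count of unmatched '..' in segs[i:]
--         if i == len(segs):
--             return [], 0
--         kept, pending = norm(i + 1)
--         s = segs[i]
--         if s == '.':
--             return kept, pending
--         if s == '..':
--             return kept, pending + 1
--         if pending:
--             return kept, pending - 1
--         return [s] + kept, pending
--
--     kept, _ = norm(0)
--     head = [''] if path.startswith('/') and (not kept or kept[0]) else []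
--     tail = [''] if path.endswith('/.') or path.endswith('/..') else []
--     return '/'.join(head + kept + tail)
-- ===== Notes on version B (the rewrite author's own statement) =====
-- stated objective: alternative
-- what changed: Replaces A's imperative left-to-right stack (append/pop) over the split segments by a right-to-left structural recursion that carries a counter of unmatched parent-directory segments and never pops, and assembles the result as one join of head + kept + tail pieces.
import Mathlib
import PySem

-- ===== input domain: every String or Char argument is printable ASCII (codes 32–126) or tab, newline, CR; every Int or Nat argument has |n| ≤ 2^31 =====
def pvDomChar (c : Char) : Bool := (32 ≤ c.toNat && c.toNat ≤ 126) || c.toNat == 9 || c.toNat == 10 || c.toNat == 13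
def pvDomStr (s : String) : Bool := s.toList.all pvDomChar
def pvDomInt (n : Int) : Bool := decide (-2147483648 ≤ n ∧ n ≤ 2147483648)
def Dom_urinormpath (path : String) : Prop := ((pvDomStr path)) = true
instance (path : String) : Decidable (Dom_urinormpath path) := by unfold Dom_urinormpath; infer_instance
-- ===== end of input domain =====

-- B replaces A's imperative left-to-right stack over the split segments by a
-- right-to-left structural recursion with a pending-'..' counter, assembling the
-- result as one join of head + kept + tail pieces (objective: alternative).

-- ===== PORT A =====
-- loop body of A: '.' skipped, non-'..' appended, '..' pops the last element if any
def aStep (out : List String) (s : String) : List String :=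
  if s = "." then out
  else if s ≠ ".." then out ++ [s]
  else if out ≠ [] then out.dropLast   -- out.pop() removes the last element
  else out

def urinormpath (path : String) : String :=
  -- path.split('/'): sep "/" is nonempty, so split? is always some
  let out := ((PySem.Str.split? path "/").getD []).foldl aStep []
  let out := if PySem.Str.startswith path "/" ∧ (out = [] ∨ out.headD "" ≠ "")
             then "" :: out else out   -- out.insert(0, '')
  let out := if PySem.Str.endswith path "/." ∨ PySem.Str.endswith path "/.."
             then out ++ [""] else out -- out.append('')
  PySem.Str.join "/" out

-- ===== PORT B =====
-- Source B's norm(i): structural recursion on the segment list segs[i:],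
-- returning (kept segments, count of unmatched '..')
def bNorm : List String → List String × Nat
  | [] => ([], 0)
  | s :: rest =>
      let kp := bNorm rest
      if s = "." then kp
      else if s = ".." then (kp.1, kp.2 + 1)
      else if kp.2 ≠ 0 then (kp.1, kp.2 - 1)
      else (s :: kp.1, kp.2)

def urinormpath_alt (path : String) : String :=
  let segs := (PySem.Str.split? path "/").getD []
  let kept := (bNorm segs).1
  let head := if PySem.Str.startswith path "/" ∧ (kept = [] ∨ kept.headD "" ≠ "")
              then [""] else []
  let tail := if PySem.Str.endswith path "/." ∨ PySem.Str.endswith path "/.."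
              then [""] else []
  PySem.Str.join "/" (head ++ kept ++ tail)

-- ===== PRECONDITION & SPEC =====
def Spec_urinormpath (path : String) (out : String) : Prop := out = urinormpath_alt path
instance (path : String) (out : String) : Decidable (Spec_urinormpath path out) := by unfold Spec_urinormpath; infer_instance

-- ===== CLAIM (what is proved, stated in full; the proofs are below) =====
def Claim_equal_urinormpath : Prop := ∀ (path : String), Dom_urinormpath path → Spec_urinormpath path (urinormpath path)

-- ===== LEMMAS AND PROOFS =====

-- n unanswered '..' pops applied to a stack (dropLast is a no-op on [])
def popN : Nat → List String → List String
  | 0, s => s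
  | n + 1, s => popN n s.dropLast

lemma popN_nil (n : Nat) : popN n [] = [] := by
  induction n with
  | zero => rfl
  | succ n ih => simpa [popN] using ih

lemma popN_append_singleton (n : Nat) (l : List String) (x : String) :
    popN (n + 1) (l ++ [x]) = popN n l := by
  simp [popN]

-- A's stack foldl, from any starting stack, in terms of B's bNorm
lemma aFold_char (segs : List String) : ∀ (stack : List String),
    segs.foldl aStep stack = popN (bNorm segs).2 stack ++ (bNorm segs).1 := by
  induction segs with
  | nil => intro stack; simp [bNorm, popN]
  | cons s rest ih =>
      intro stack
      rw [List.foldl_cons, ih]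
      show _ = popN (bNorm (s :: rest)).2 stack ++ (bNorm (s :: rest)).1
      simp only [bNorm]
      by_cases h1 : s = "."
      · simp [aStep, h1]
      · by_cases h2 : s = ".."
        · have hstep : aStep stack s = stack.dropLast := by
            by_cases hs : stack = []
            · simp [aStep, h2, hs]
            · simp [aStep, h2, hs]
          rw [hstep]
          simp only [h2, if_true, if_neg (by decide : ¬(".." = "."))]
          rfl
        · have hstep : aStep stack s = stack ++ [s] := by simp [aStep, h1, h2]
          rw [hstep]
          simp only [if_neg h1, if_neg h2]
          by_cases h3 : (bNorm rest).2 ≠ 0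
          · simp only [if_pos h3]
            obtain ⟨q, hq⟩ : ∃ q, (bNorm rest).2 = q + 1 := ⟨(bNorm rest).2 - 1, by omega⟩
            rw [hq, popN_append_singleton]
            simp
          · simp only [if_neg h3]
            have h0 : (bNorm rest).2 = 0 := by omega
            simp [h0, popN]

-- ===== VERDICT (by name: the statement is the Claim_ definition above) =====
theorem urinormpath_spec : Claim_equal_urinormpath := by
  intro path _
  unfold Spec_urinormpath urinormpath urinormpath_alt
  rw [aFold_char, popN_nil]
  simp only [List.nil_append]
  split_ifs <;> simp
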